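-- pv_equiv track=rewrite | github.com/michalsciubisz/opltymalizacja_wielo | main.py | algorytm_punkt_idealny
-- ===== SOURCE A (Python) =====
-- def dominuje(A, B):
--     # Punkt A dominuje nad punktem B, jeśli każda współrzędna A jest <= każdej współrzędnej B
--     # i przynajmniej jedna współrzędna A jest mniejsza niż odpowiadająca współrzędna B.
--     czy_mniejszy = False  # Sprawdzenie, czy istnieje współrzędna mniejsza
--
--     for a, b in zip(A, B):
--         if a > b:
--             return False  # Jeśli którakolwiek współrzędna A jest większa, A nie dominuje B
--         if a < b:
--             czy_mniejszy = True  # Znaleziono przynajmniej jedną współrzędną mniejszą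
--
--     return czy_mniejszy
--
-- def odleglosc_kwadratowa(A, B):
--     return sum((a - b) ** 2 for a, b in zip(A, B))
--
-- def algorytm_punkt_idealny(X):
--     n = len(X)
--     k = len(X[0])
--     P = []
--     xmin = [min(X[i][j] for i in range(n)) for j in range(k)]
--     d = [odleglosc_kwadratowa(xmin, X[j]) for j in range(n)]
--     J = sorted(range(n), key=lambda j: d[j])
--
--     M = n
--     m = 0
--
--     usuniety = [False] * n
--     while m < M:
--         aktualny_punkt = X[J[m]]
--
--         if not usuniety[J[m]]:
--             for i in range(n):
--                 if not usuniety[i] and dominuje(aktualny_punkt, X[i]):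
--                     usuniety[i] = True
--             P.append(aktualny_punkt)
--             usuniety[J[m]] = True
--         m += 1
--
--     return P
-- ===== SOURCE B (Python) =====
-- def algorytm_punkt_idealny(X):
--     k = len(X[0])
--     ideal = [min(x[j] for x in X) for j in range(k)]
--
--     def klucz(p):
--         return sum((p[j] - ideal[j]) ** 2 for j in range(k))
--
--     def dominates(q, p):
--         pairs = zip(q, p)
--         for a, b in pairs:
--             if a != b:
--                 if a > b:
--                     return False
--                 return all(x <= y for x, y in pairs)
--         return False
--
--     front = []
--     for p in sorted(X, key=klucz):
--         if not any(dominates(q, p) for q in front):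
--             front.append(p)
--     return front
-- ===== Notes on version B (the rewrite author's own statement) =====
-- stated objective: simpler
-- what changed: Instead of sorting indices and sweeping a boolean removal array over all n points for every kept point, B sorts the points themselves by distance to the ideal point once and builds the Pareto front in a single filtering pass, keeping a point iff no already-kept point dominates it.
-- outside the precondition, e.g. on algorytm_punkt_idealny([]): A raises IndexError, B raises IndexError; on algorytm_punkt_idealny([[1, 2], [3]]): A raises IndexError, B raises IndexError
import Mathlib
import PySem

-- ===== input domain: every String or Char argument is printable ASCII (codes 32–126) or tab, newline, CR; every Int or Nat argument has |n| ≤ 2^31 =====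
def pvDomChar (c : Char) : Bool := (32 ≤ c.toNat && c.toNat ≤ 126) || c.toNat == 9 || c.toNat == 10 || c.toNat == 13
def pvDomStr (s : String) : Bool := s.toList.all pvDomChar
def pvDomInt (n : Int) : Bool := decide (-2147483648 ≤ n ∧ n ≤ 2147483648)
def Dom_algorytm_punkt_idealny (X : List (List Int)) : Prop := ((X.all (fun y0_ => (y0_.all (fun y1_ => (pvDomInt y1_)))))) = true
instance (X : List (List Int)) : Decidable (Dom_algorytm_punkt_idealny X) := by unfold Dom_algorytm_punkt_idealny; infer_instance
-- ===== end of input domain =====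

-- B replaces A's index sort plus boolean removal-array sweeps by a single stable sort of the
-- points followed by one filtering pass against the growing Pareto front (objective: simpler).


-- ===== PORT A =====
-- 'for a, b in zip(A, B): …' with early return, state = czy_mniejszy
def dominujeLoop : List (Int × Int) → Bool → Bool
  | [], acc => acc
  | (a, b) :: t, acc =>
    if a > b then false
    else if a < b then dominujeLoop t true
    else dominujeLoop t acc

def dominuje (A B : List Int) : Bool := dominujeLoop (A.zip B) false

def odleglosc_kwadratowa (A B : List Int) : Int :=
  ((A.zip B).map (fun ab => (ab.1 - ab.2) ^ 2)).sum

-- the 'while m < M' loop of A: walks J, state = (usuniety, P)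
def loopA (X : List (List Int)) (n : Int) : List Int → List Bool → List (List Int) → List (List Int)
  | [], _, P => P
  | j :: rest, usun, P =>
    let aktualny := PySem.List.pyGetD X j []
    if PySem.List.pyGetD usun j false = false then
      let usun' := (PySem.List.pyRange 0 n 1).foldl (fun u i =>
        if (!PySem.List.pyGetD u i false) && dominuje aktualny (PySem.List.pyGetD X i [])
        then PySem.List.pySetD u i true else u) usun
      loopA X n rest (PySem.List.pySetD usun' j true) (P ++ [aktualny])
    else
      loopA X n rest usun P

def algorytm_punkt_idealny (X : List (List Int)) : List (List Int) :=
  let n : Int := PySem.List.len X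
  let k : Int := PySem.List.len (PySem.List.pyGetD X 0 [])
  let xmin : List Int := (PySem.List.pyRange 0 k 1).map (fun j =>
    PySem.List.minD ((PySem.List.pyRange 0 n 1).map (fun i =>
      PySem.List.pyGetD (PySem.List.pyGetD X i []) j 0)) (fun x => x) 0)
  let d : List Int := (PySem.List.pyRange 0 n 1).map (fun j =>
    odleglosc_kwadratowa xmin (PySem.List.pyGetD X j []))
  let J : List Int := PySem.List.sorted (PySem.List.pyRange 0 n 1)
    (fun j => PySem.List.pyGetD d j 0) false
  loopA X n J (List.replicate n.toNat false) []

-- ===== PORT B =====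
-- B's dominance test: scan to the first differing coordinate, then 'all(x <= y)' on the rest
def dominatesGo : List (Int × Int) → Bool
  | [] => false
  | (a, b) :: t =>
    if a ≠ b then
      (if a > b then false else t.all (fun ab => ab.1 ≤ ab.2))
    else dominatesGo t

def dominates (q p : List Int) : Bool := dominatesGo (q.zip p)

def algorytm_punkt_idealny_alt (X : List (List Int)) : List (List Int) :=
  let k : Int := PySem.List.len (PySem.List.pyGetD X 0 [])
  let ideal : List Int := (PySem.List.pyRange 0 k 1).map (fun j =>
    PySem.List.minD (X.map (fun x => PySem.List.pyGetD x j 0)) (fun x => x) 0)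
  let klucz : List Int → Int := fun p =>
    ((PySem.List.pyRange 0 k 1).map (fun j =>
      (PySem.List.pyGetD p j 0 - PySem.List.pyGetD ideal j 0) ^ 2)).sum
  (PySem.List.sorted X klucz false).foldl (fun front p =>
    if front.any (fun q => dominates q p) then front else front ++ [p]) []

-- ===== PRECONDITION & SPEC =====
-- Pre_ excludes exactly the inputs on which A raises IndexError: the empty list (X[0])
-- and inputs with a row shorter than the first row (X[i][j] for j < len(X[0])).
def Pre_algorytm_punkt_idealny (X : List (List Int)) : Prop :=
  X ≠ [] ∧ ∀ r ∈ X, (X.headD []).length ≤ r.length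
instance (X : List (List Int)) : Decidable (Pre_algorytm_punkt_idealny X) := by
  unfold Pre_algorytm_punkt_idealny; infer_instance

def pvWitness_algorytm_punkt_idealny : List (List Int) := [[1, 2], [3, 0], [0, 0, 5]]

def Spec_algorytm_punkt_idealny (X : List (List Int)) (out : List (List Int)) : Prop := out = algorytm_punkt_idealny_alt X
instance (X : List (List Int)) (out : List (List Int)) : Decidable (Spec_algorytm_punkt_idealny X out) := by unfold Spec_algorytm_punkt_idealny; infer_instance

-- ===== CLAIM (what is proved, stated in full; the proofs are below) =====
def Claim_equal_algorytm_punkt_idealny : Prop := ∀ (X : List (List Int)), Dom_algorytm_punkt_idealny X → Pre_algorytm_punkt_idealny X → Spec_algorytm_punkt_idealny X (algorytm_punkt_idealny X)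

-- ===== LEMMAS AND PROOFS =====

theorem pyGetD_pySetD_int {α : Type} (xs : List α) (i m : Int) (v d : α)
    (h0 : 0 ≤ i) (h1 : i < (xs.length : Int)) (h2 : 0 ≤ m) :
    PySem.List.pyGetD (PySem.List.pySetD xs i v) m d = if m = i then v else PySem.List.pyGetD xs m d := by
  rw [show i = ((i.toNat : Nat) : Int) by omega, show m = ((m.toNat : Nat) : Int) by omega]
  rw [PySem.List.pyGetD_pySetD_natCast xs i.toNat m.toNat v d (by omega)]
  by_cases h : m.toNat = i.toNat
  · rw [if_pos h, if_pos (by omega)]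
  · rw [if_neg h, if_neg (show ¬ ((m.toNat : Int) = (i.toNat : Int)) by omega)]

theorem sweep_length (X : List (List Int)) (cur : List Int) (l : List Int) (u : List Bool) :
    (l.foldl (fun u i =>
      if (!PySem.List.pyGetD u i false) && dominuje cur (PySem.List.pyGetD X i [])
      then PySem.List.pySetD u i true else u) u).length = u.length := by
  induction l generalizing u with
  | nil => rfl
  | cons a t ih =>
    simp only [List.foldl_cons]
    rw [ih]
    split
    · exact PySem.List.length_pySetD u a true
    · rfl

theorem sweep_getD (X : List (List Int)) (cur : List Int) :
    ∀ (N : Nat) (a : Int) (u : List Bool), 0 ≤ a → u.length = X.length →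
      ((X.length : Int) - a).toNat = N → ∀ i : Int, 0 ≤ i → i < (X.length : Int) →
      PySem.List.pyGetD ((PySem.List.pyRange a (X.length : Int) 1).foldl (fun u i =>
        if (!PySem.List.pyGetD u i false) && dominuje cur (PySem.List.pyGetD X i [])
        then PySem.List.pySetD u i true else u) u) i false
      = if a ≤ i then (PySem.List.pyGetD u i false || dominuje cur (PySem.List.pyGetD X i []))
        else PySem.List.pyGetD u i false := by
  intro N
  induction N with
  | zero =>
    intro a u ha0 hlen hN i h0 h1
    rw [PySem.List.pyRange_one_eq_nil (by omega)]
    rw [if_neg (by omega)]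
    rfl
  | succ N ih =>
    intro a u ha0 hlen hN i h0 h1
    have ha : a < (X.length : Int) := by omega
    rw [PySem.List.pyRange_one_cons ha]
    simp only [List.foldl_cons]
    set u' := (if (!PySem.List.pyGetD u a false) && dominuje cur (PySem.List.pyGetD X a [])
        then PySem.List.pySetD u a true else u) with hu'
    have hlen' : u'.length = X.length := by
      rw [hu']; split
      · rw [PySem.List.length_pySetD]; exact hlen
      · exact hlen
    have hval : ∀ m : Int, 0 ≤ m → m < (X.length : Int) →
        PySem.List.pyGetD u' m false
          = if m = a then (PySem.List.pyGetD u a false || dominuje cur (PySem.List.pyGetD X a []))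
            else PySem.List.pyGetD u m false := by
      intro m hm0 hm1
      rw [hu']
      split
      · next hcond =>
        rw [pyGetD_pySetD_int u a m true false ha0 (by omega) hm0]
        simp only [Bool.and_eq_true, Bool.not_eq_true'] at hcond
        by_cases hma : m = a
        · simp [hma, hcond.1, hcond.2]
        · simp [hma]
      · next hcond =>
        by_cases hma : m = a
        · subst hma
          rcases Bool.eq_false_or_eq_true (PySem.List.pyGetD u m false) with ht | hf
          · simp [ht]
          · simp only [hf, Bool.false_or]
            simp [hf] at hcond
            simp [hcond]
        · simp [hma]
    rw [ih (a + 1) u' (by omega) hlen' (by omega) i h0 h1]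
    by_cases hia : i = a
    · subst hia
      rw [if_neg (by omega), if_pos (le_refl _), hval i h0 h1, if_pos rfl]
    · rw [hval i h0 h1, if_neg hia]
      by_cases hle : a ≤ i
      · rw [if_pos (by omega), if_pos hle]
      · rw [if_neg (by omega), if_neg hle]
theorem dominujeLoop_eq (zs : List (Int × Int)) (acc : Bool) :
    dominujeLoop zs acc =
      ((zs.all (fun ab => ab.1 ≤ ab.2)) && (acc || zs.any (fun ab => ab.1 < ab.2))) := by
  induction zs generalizing acc with
  | nil => simp [dominujeLoop]
  | cons hd t ih =>
    obtain ⟨a, b⟩ := hd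
    simp only [dominujeLoop, List.all_cons, List.any_cons]
    split_ifs with h1 h2
    · simp [show ¬ (a ≤ b) by omega]
    · simp [ih, show a ≤ b by omega, show a < b from h2]
    · have hab : a = b := by omega
      simp [ih, hab]

theorem dominatesGo_eq (zs : List (Int × Int)) :
    dominatesGo zs = ((zs.all (fun ab => ab.1 ≤ ab.2)) && (zs.any (fun ab => ab.1 < ab.2))) := by
  induction zs with
  | nil => simp [dominatesGo]
  | cons hd t ih =>
    obtain ⟨a, b⟩ := hd
    simp only [dominatesGo, List.all_cons, List.any_cons]
    split_ifs with h1 h2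
    · simp [show ¬ (a ≤ b) by omega]
    · simp [show a ≤ b by omega, show a < b by omega]
    · have hab : a = b := by omega
      simp [ih, hab]

theorem dominuje_eq (A B : List Int) : dominuje A B = dominates A B := by
  simp only [dominuje, dominates, dominujeLoop_eq, dominatesGo_eq, Bool.false_or]

theorem loopA_eq (X : List (List Int)) :
    ∀ (J : List Int) (usun : List Bool) (K : List Int),
      usun.length = X.length →
      (∀ j ∈ J, 0 ≤ j ∧ j < (X.length : Int)) →
      (∀ j ∈ J, j ∉ K) →
      J.Nodup →
      (∀ i : Int, 0 ≤ i → i < (X.length : Int) →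
        (PySem.List.pyGetD usun i false = true ↔
          i ∈ K ∨ ∃ j' ∈ K, dominuje (PySem.List.pyGetD X j' []) (PySem.List.pyGetD X i []) = true)) →
      loopA X (X.length : Int) J usun (K.map (fun j => PySem.List.pyGetD X j [])) =
        J.foldl (fun front j =>
          if front.any (fun q => dominates q (PySem.List.pyGetD X j [])) then front
          else front ++ [PySem.List.pyGetD X j []]) (K.map (fun j => PySem.List.pyGetD X j [])) := by
  intro J
  induction J with
  | nil => intro usun K _ _ _ _ _; rfl
  | cons j rest ih =>
    intro usun K hlen hrange hdisj hnodup hinv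
    obtain ⟨hj0, hj1⟩ := hrange j (by simp)
    have hjK : j ∉ K := hdisj j (by simp)
    have hinvj := hinv j hj0 hj1
    simp only [List.foldl_cons, loopA]
    rcases Bool.eq_false_or_eq_true (PySem.List.pyGetD usun j false) with hU | hU
    · -- skipped: j already removed, and some kept point dominates it
      rw [if_neg (by simp [hU])]
      have hdomex : ∃ j' ∈ K, dominuje (PySem.List.pyGetD X j' []) (PySem.List.pyGetD X j []) = true := by
        rcases hinvj.mp hU with hK | hex
        · exact absurd hK hjK
        · exact hex
      obtain ⟨j', hj'K, hj'dom⟩ := hdomex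
      have hany : (K.map (fun j => PySem.List.pyGetD X j [])).any
          (fun q => dominates q (PySem.List.pyGetD X j [])) = true := by
        rw [List.any_eq_true]
        exact ⟨PySem.List.pyGetD X j' [], List.mem_map.mpr ⟨j', hj'K, rfl⟩,
          by rw [← dominuje_eq]; exact hj'dom⟩
      rw [hany]
      exact ih usun K hlen (fun x hx => hrange x (by simp [hx]))
        (fun x hx => hdisj x (by simp [hx])) (List.Nodup.of_cons hnodup) hinv
    · -- kept: no kept point dominates j
      rw [if_pos (by simp [hU])]
      have hany : (K.map (fun j => PySem.List.pyGetD X j [])).any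
          (fun q => dominates q (PySem.List.pyGetD X j [])) = false := by
        rw [List.any_eq_false]
        rintro q hq
        rcases List.mem_map.mp hq with ⟨j', hj'K, rfl⟩
        intro hdom
        have : PySem.List.pyGetD usun j false = true :=
          hinvj.mpr (Or.inr ⟨j', hj'K, by rw [dominuje_eq]; exact hdom⟩)
        rw [this] at hU; cases hU
      rw [hany]
      simp only [Bool.false_eq_true, if_false]
      set cur := PySem.List.pyGetD X j [] with hcur
      set usun' := (PySem.List.pyRange 0 (X.length : Int) 1).foldl (fun u i =>
        if (!PySem.List.pyGetD u i false) && dominuje cur (PySem.List.pyGetD X i [])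
        then PySem.List.pySetD u i true else u) usun with husun'
      have hlen' : usun'.length = X.length := by
        rw [husun', sweep_length, hlen]
      have hlen'' : (PySem.List.pySetD usun' j true).length = X.length := by
        rw [PySem.List.length_pySetD, hlen']
      have hmapK : (K.map (fun j => PySem.List.pyGetD X j [])) ++ [cur]
          = (K ++ [j]).map (fun j => PySem.List.pyGetD X j []) := by simp [hcur]
      rw [hmapK]
      refine (ih (PySem.List.pySetD usun' j true) (K ++ [j]) hlen''
        (fun x hx => hrange x (by simp [hx]))
        (fun x hx => by
          simp only [List.mem_append, List.mem_singleton]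
          rintro (hK | rfl)
          · exact hdisj x (by simp [hx]) hK
          · exact (List.nodup_cons.mp hnodup).1 hx)
        (List.Nodup.of_cons hnodup) ?_)
      intro i h0 h1
      rw [pyGetD_pySetD_int usun' j i true false hj0 (by omega) h0]
      by_cases hij : i = j
      · simp [hij]
      · rw [if_neg hij]
        rw [husun', sweep_getD X cur X.length 0 usun (by omega) hlen (by omega) i h0 h1,
          if_pos h0]
        rw [Bool.or_eq_true, hinv i h0 h1]
        constructor
        · rintro ((hK | hex) | hdom)
          · exact Or.inl (by simp [hK])
          · obtain ⟨j', hj', hd⟩ := hex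
            exact Or.inr ⟨j', by simp [hj'], hd⟩
          · exact Or.inr ⟨j, by simp, hdom⟩
        · rintro (hK | ⟨j', hj', hd⟩)
          · rcases List.mem_append.mp hK with h | h
            · exact Or.inl (Or.inl h)
            · simp at h; exact absurd h hij
          · rcases List.mem_append.mp hj' with h | h
            · exact Or.inl (Or.inr ⟨j', h, hd⟩)
            · simp at h; subst h; exact Or.inr hd
theorem map_insertBy {α β : Type} (g : α → β) (pA : α → α → Bool) (pB : β → β → Bool)
    (x : α) (ys : List α) (h : ∀ y ∈ ys, pA x y = pB (g x) (g y)) :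
    (PySem.List.insertBy pA x ys).map g = PySem.List.insertBy pB (g x) (ys.map g) := by
  induction ys with
  | nil => simp [PySem.List.insertBy]
  | cons y t ih =>
    have hy := h y (by simp)
    simp only [PySem.List.insertBy, List.map_cons, ← hy]
    by_cases hc : pA x y = true
    · simp [hc]
    · simp only [Bool.not_eq_true] at hc
      simp [hc, ih (fun z hz => h z (by simp [hz]))]

theorem map_foldl_insertBy {α β : Type} (g : α → β) (kA : α → Int) (kB : β → Int)
    (xs acc : List α) (hxs : ∀ a ∈ xs, kA a = kB (g a)) (hacc : ∀ a ∈ acc, kA a = kB (g a)) :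
    (xs.foldl (fun acc x => PySem.List.insertBy (fun a b => decide (kA a < kA b)) x acc) acc).map g
      = (xs.map g).foldl (fun acc x => PySem.List.insertBy (fun a b => decide (kB a < kB b)) x acc) (acc.map g) := by
  induction xs generalizing acc with
  | nil => simp
  | cons x t ih =>
    simp only [List.foldl_cons, List.map_cons]
    have hstep : (PySem.List.insertBy (fun a b => decide (kA a < kA b)) x acc).map g
        = PySem.List.insertBy (fun a b => decide (kB a < kB b)) (g x) (acc.map g) :=
      map_insertBy g _ _ x acc
        (fun y hy => by show decide (kA x < kA y) = decide (kB (g x) < kB (g y)); rw [hxs x (by simp), hacc y hy])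
    rw [← hstep]
    refine ih _ (fun a ha => hxs a (by simp [ha])) (fun a ha => ?_)
    rcases (PySem.List.mem_insertBy _ x a acc).mp ha with h1 | h1
    · subst h1; exact hxs a (by simp)
    · exact hacc a h1

theorem sorted_map_comm {α β : Type} (g : α → β) (kA : α → Int) (kB : β → Int)
    (xs : List α) (hxs : ∀ a ∈ xs, kA a = kB (g a)) :
    (PySem.List.sorted xs kA false).map g = PySem.List.sorted (xs.map g) kB false := by
  rw [PySem.List.sorted_eq_foldl_insertBy, PySem.List.sorted_eq_foldl_insertBy]
  simpa using map_foldl_insertBy g kA kB xs [] hxs (by simp)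

theorem colA_eq (X : List (List Int)) (j : Int) :
    (PySem.List.pyRange 0 (X.length : Int) 1).map (fun i => PySem.List.pyGetD (PySem.List.pyGetD X i []) j 0)
      = X.map (fun x => PySem.List.pyGetD x j 0) := by
  conv_rhs => rw [← PySem.List.map_pyGetD_pyRange_zero' X []]
  rw [List.map_map]
  rfl

theorem odl_eq (xmin p : List Int) (k : Int) (hk : 0 ≤ k)
    (hx : xmin.length = k.toNat) (hp : k.toNat ≤ p.length) :
    odleglosc_kwadratowa xmin p
      = ((PySem.List.pyRange 0 k 1).map (fun j =>
          (PySem.List.pyGetD p j 0 - PySem.List.pyGetD xmin j 0) ^ 2)).sum := by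
  unfold odleglosc_kwadratowa
  apply congrArg List.sum
  apply List.ext_getElem
  · simp [PySem.List.length_pyRange_one, hx]; omega
  · intro t h1 h2
    simp only [List.getElem_map, List.getElem_zip, PySem.List.getElem_pyRange_one]
    have ht : t < k.toNat := by
      simp only [List.length_map, List.length_zip, hx] at h1
      omega
    have htx : t < xmin.length := by omega
    have htp : t < p.length := by omega
    rw [show (0 : Int) + (t : Int) = ((t : Nat) : Int) by omega]
    rw [PySem.List.pyGetD_natCast, PySem.List.pyGetD_natCast,
      List.getD_eq_getElem p 0 htp, List.getD_eq_getElem xmin 0 htx]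
    ring

theorem main_eq (X : List (List Int)) (hne : X ≠ [])
    (hrows : ∀ r ∈ X, (X.headD []).length ≤ r.length) :
    algorytm_punkt_idealny X = algorytm_punkt_idealny_alt X := by
  unfold algorytm_punkt_idealny algorytm_punkt_idealny_alt
  simp only [PySem.List.len_eq, Int.toNat_natCast, colA_eq]
  set k : Int := ((PySem.List.pyGetD X 0 []).length : Int) with hk
  set xmin : List Int := (PySem.List.pyRange 0 k 1).map (fun j =>
    PySem.List.minD (X.map (fun x => PySem.List.pyGetD x j 0)) (fun x => x) 0) with hxmin
  set klucz : List Int → Int := fun p =>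
    ((PySem.List.pyRange 0 k 1).map (fun j =>
      (PySem.List.pyGetD p j 0 - PySem.List.pyGetD xmin j 0) ^ 2)).sum with hklucz
  set d : List Int := (PySem.List.pyRange 0 (X.length : Int) 1).map (fun j =>
    odleglosc_kwadratowa xmin (PySem.List.pyGetD X j [])) with hd
  set J : List Int := PySem.List.sorted (PySem.List.pyRange 0 (X.length : Int) 1)
    (fun j => PySem.List.pyGetD d j 0) false with hJ
  -- facts about k / xmin
  have hk0 : 0 ≤ k := by rw [hk]; positivity
  have hxlen : xmin.length = k.toNat := by
    rw [hxmin]; simp [PySem.List.length_pyRange_one]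
  have hget0 : PySem.List.pyGetD X 0 [] = X.headD [] := by
    rw [PySem.List.pyGetD_zero]
    cases X with
    | nil => rfl
    | cons a t => rfl
  -- every real row is at least k long
  have hprow : ∀ j : Int, 0 ≤ j → j < (X.length : Int) →
      k.toNat ≤ (PySem.List.pyGetD X j []).length := by
    intro j h0 h1
    have hmem : PySem.List.pyGetD X j [] ∈ X := by
      rw [PySem.List.pyGetD_eq_getElem X [] h0 (by simpa using h1)]
      exact List.getElem_mem _
    have := hrows _ hmem
    rw [hk, ← hget0] at *
    omega
  -- keys agree on the index range
  have hkey : ∀ j ∈ PySem.List.pyRange 0 (X.length : Int) 1,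
      PySem.List.pyGetD d j 0 = klucz (PySem.List.pyGetD X j []) := by
    intro j hj
    rw [PySem.List.mem_pyRange_one] at hj
    rw [hd, PySem.List.pyGetD_map_pyRange_of_nonneg _ _ _ _ hj.1 hj.2]
    exact odl_eq xmin _ k hk0 hxlen (hprow j hj.1 hj.2)
  -- the sorted index list maps onto B's sorted point list
  have hsorted : J.map (fun j => PySem.List.pyGetD X j []) = PySem.List.sorted X klucz false := by
    rw [hJ]
    rw [sorted_map_comm (fun j => PySem.List.pyGetD X j []) _ klucz _ hkey]
    rw [PySem.List.map_pyGetD_pyRange_zero']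
  -- A's loop is B's filtering fold
  have hloop := loopA_eq X J (List.replicate X.length false) []
    (by simp)
    (fun j hj => by
      have := (PySem.List.mem_pyRange_one).mp ((PySem.List.mem_sorted _ _ _ _).mp hj)
      exact ⟨this.1, this.2⟩)
    (fun j _ hmem => (List.not_mem_nil (a := j)) hmem)
    ((PySem.List.sorted_perm _ _ _).nodup_iff.mpr (PySem.List.nodup_pyRange_one 0 (X.length : Int)))
    (fun i h0 h1 => by
      have hrep : PySem.List.pyGetD (List.replicate X.length false) i false = false := by
        rw [show i = ((i.toNat : Nat) : Int) by omega, PySem.List.pyGetD_natCast]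
        simp [List.getD]
      simp [hrep])
  simp only [List.map_nil] at hloop
  rw [hloop, ← hsorted, List.foldl_map]

-- ===== VERDICT (by name: the statement is the Claim_ definition above) =====
theorem algorytm_punkt_idealny_spec : Claim_equal_algorytm_punkt_idealny := by
  intro X _ hpre
  have h := hpre
  unfold Pre_algorytm_punkt_idealny at h
  unfold Spec_algorytm_punkt_idealny
  exact main_eq X h.1 h.2
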